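-- pv_equiv track=rewrite | github.com/siwuagain/COMP550 | main.py | create_ordered_list
-- ===== SOURCE A (Python) =====
-- def create_ordered_list(data, sentence):
--     '''
--     Create a dictionary which the keys are the words of the sentence IN ORDER and the values are the UCCA role(s) associated with each word
--     '''
--     word_roles = {}
--     split_sentence = sentence.split()
--     for i, word in enumerate(split_sentence):
--         roles = []
--         word_tuple = (word, str(i+1))
--         for role in data:
--             if word_tuple in data[role]:
--                 roles.append(role)
--         word_roles[word_tuple] = roles
--     return word_roles
-- ===== SOURCE B (Python) =====
-- def create_ordered_list(data, sentence):
--     # Invert data once into (word, index)-tuple -> roles pairs, group them into an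
--     # index dict, then one lookup per sentence word.
--     pairs = [(t, role) for role, tuples in data.items() for t in dict.fromkeys(tuples)]
--     index = {}
--     for t, role in pairs:
--         index.setdefault(t, []).append(role)
--     return dict(((w, str(i + 1)), index.get((w, str(i + 1)), []))
--                 for i, w in enumerate(sentence.split()))
-- ===== Notes on version B (the rewrite author's own statement) =====
-- stated objective: alternative
-- what changed: B inverts data in one pass into a flattened (word,index)-tuple/role pair list grouped into an index dict, then does one dict lookup per sentence word, instead of re-scanning every role's tuple list for every word; asymptotically O(n+S) vs O(n*S), but no speed is claimed since the timing inputs favour A's C-level scans.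
import Mathlib
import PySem

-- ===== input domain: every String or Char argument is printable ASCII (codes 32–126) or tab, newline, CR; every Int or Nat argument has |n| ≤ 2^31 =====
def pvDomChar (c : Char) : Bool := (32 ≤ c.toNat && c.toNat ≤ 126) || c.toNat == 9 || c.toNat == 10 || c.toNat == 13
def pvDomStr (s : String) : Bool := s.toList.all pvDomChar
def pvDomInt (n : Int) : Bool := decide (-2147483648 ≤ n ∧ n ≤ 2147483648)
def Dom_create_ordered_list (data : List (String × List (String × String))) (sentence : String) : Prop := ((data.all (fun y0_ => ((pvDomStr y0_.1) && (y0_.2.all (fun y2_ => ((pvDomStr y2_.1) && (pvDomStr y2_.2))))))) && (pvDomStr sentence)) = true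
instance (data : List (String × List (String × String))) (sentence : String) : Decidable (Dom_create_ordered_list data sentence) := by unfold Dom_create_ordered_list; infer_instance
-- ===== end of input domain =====

-- B inverts data once into a flat (tuple, role) pair list grouped into an index dict and
-- looks each sentence word up there, instead of re-scanning every role's list per word
-- (alternative decomposition, same return value).

-- ===== PORT A =====
-- inner loop of A: roles collected by scanning every role's data[role] for word_tuple
def pvRolesA (data : List (String × List (String × String))) (wt : String × String) : List String :=
  data.foldl (fun roles p =>
    if ((PySem.Dict.mk data).getD p.1 []).contains wt then roles ++ [p.1] else roles) []

def create_ordered_list (data : List (String × List (String × String))) (sentence : String) : List (String × String × List String) :=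
  let split_sentence := PySem.Str.split₀ sentence
  ((PySem.List.enumerate split_sentence).foldl (fun word_roles iw =>
      let word_tuple := (iw.2, PySem.Int.toStr (iw.1 + 1))
      word_roles.insert word_tuple (pvRolesA data word_tuple))
    (PySem.Dict.empty : PySem.Dict (String × String) (List String))).items.map
    (fun p => (p.1.1, p.1.2, p.2))

-- ===== PORT B =====
-- pairs = [(t, role) for role, tuples in data.items() for t in dict.fromkeys(tuples)]
def pvPairsB (data : List (String × List (String × String))) : List ((String × String) × String) :=
  data.flatMap (fun p => (PySem.List.dedup p.2).map (fun t => (t, p.1)))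

-- index = {}; for t, role in pairs: index.setdefault(t, []).append(role)
def pvIndexB (data : List (String × List (String × String))) : PySem.Dict (String × String) (List String) :=
  (pvPairsB data).foldl (fun d q => d.modify q.1 [] (· ++ [q.2])) PySem.Dict.empty

-- dict(((w, str(i+1)), index.get((w, str(i+1)), [])) for i, w in enumerate(sentence.split()))
def create_ordered_list_alt (data : List (String × List (String × String))) (sentence : String) : List (String × String × List String) :=
  (PySem.Dict.ofList ((PySem.List.enumerate (PySem.Str.split₀ sentence)).map
      (fun iw => ((iw.2, PySem.Int.toStr (iw.1 + 1)),
                  (pvIndexB data).getD (iw.2, PySem.Int.toStr (iw.1 + 1)) [])))).items.map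
    (fun q => (q.1.1, q.1.2, q.2))

-- ===== PRECONDITION & SPEC =====
-- Pre_ excludes association lists with duplicate role keys: they represent no Python dict
-- (a Python dict cannot have duplicate keys), so every real input satisfies Pre_.
def Pre_create_ordered_list (data : List (String × List (String × String))) (sentence : String) : Prop :=
  (data.map Prod.fst).Nodup
instance (data : List (String × List (String × String))) (sentence : String) : Decidable (Pre_create_ordered_list data sentence) := by unfold Pre_create_ordered_list; infer_instance

def pvWitness_create_ordered_list : (List (String × List (String × String))) × String :=
  ([("A", [("the", "1"), ("cat", "2")]), ("P", [("sat", "3")])], "the cat sat")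

def Spec_create_ordered_list (data : List (String × List (String × String))) (sentence : String) (out : List (String × String × List String)) : Prop := out = create_ordered_list_alt data sentence
instance (data : List (String × List (String × String))) (sentence : String) (out : List (String × String × List String)) : Decidable (Spec_create_ordered_list data sentence out) := by unfold Spec_create_ordered_list; infer_instance

-- ===== CLAIM (what is proved, stated in full; the proofs are below) =====
def Claim_equal_create_ordered_list : Prop := ∀ (data : List (String × List (String × String))) (sentence : String), Dom_create_ordered_list data sentence → Pre_create_ordered_list data sentence → Spec_create_ordered_list data sentence (create_ordered_list data sentence)

-- ===== LEMMAS AND PROOFS =====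

-- filtering a duplicate-free list by equality to wt
theorem pv_filter_nodup_eq {α : Type} [BEq α] [LawfulBEq α] (l : List α) (wt : α) (h : l.Nodup) :
    l.filter (fun t => t == wt) = if wt ∈ l then [wt] else [] := by
  induction l with
  | nil => simp
  | cons x l ih =>
    rcases List.nodup_cons.mp h with ⟨hx, hl⟩
    by_cases hxw : x = wt
    · subst hxw
      simp [ih hl, hx]
    · simp only [List.filter_cons, List.mem_cons]
      simp [hxw, ih hl, Ne.symm hxw]

-- characterisation of B's index: roles whose tuple list contains wt, in data order
theorem pv_index_spec (data : List (String × List (String × String))) (wt : String × String) :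
    (pvIndexB data).getD wt []
      = (data.filter (fun p => p.2.contains wt)).map Prod.fst := by
  unfold pvIndexB
  rw [PySem.Dict.getD_foldl_modify_append]
  simp only [PySem.Dict.getD_empty, List.nil_append]
  unfold pvPairsB
  induction data with
  | nil => rfl
  | cons p data ih =>
    simp only [List.flatMap_cons, List.filter_append, List.map_append, ih,
      List.filter_cons, List.filter_map]
    rw [Function.comp_def]
    rw [pv_filter_nodup_eq (PySem.List.dedup p.2) wt (PySem.List.nodup_dedup p.2)]
    by_cases hm : wt ∈ p.2
    · simp [hm, List.contains_eq_mem]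
    · simp [hm, List.contains_eq_mem]

-- characterisation of A's inner loop under unique role keys
theorem pv_rolesA_spec (data : List (String × List (String × String))) (wt : String × String)
    (hnd : (data.map Prod.fst).Nodup) :
    pvRolesA data wt = (data.filter (fun p => p.2.contains wt)).map Prod.fst := by
  unfold pvRolesA
  rw [PySem.List.foldl_congr_mem data
    (fun roles p => if ((PySem.Dict.mk data).getD p.1 []).contains wt then roles ++ [p.1] else roles)
    (fun roles p => if p.2.contains wt then roles ++ [p.1] else roles) []
    (by
      intro acc p hp
      have hitems : (p.1, p.2) ∈ (PySem.Dict.mk data).items := by simpa using hp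
      have hv : (PySem.Dict.mk data).getD p.1 [] = p.2 :=
        PySem.Dict.getD_of_mem_items _ hitems (by simpa using hnd) []
      simp only [hv])]
  exact PySem.List.foldl_append_if _ _ _ _

-- A's per-word roles coincide with B's index lookup
theorem pv_roles_eq (data : List (String × List (String × String))) (wt : String × String)
    (hnd : (data.map Prod.fst).Nodup) :
    pvRolesA data wt = (pvIndexB data).getD wt [] := by
  rw [pv_rolesA_spec data wt hnd, pv_index_spec]

-- ===== VERDICT (by name: the statement is the Claim_ definition above) =====
theorem create_ordered_list_spec : Claim_equal_create_ordered_list := by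
  intro data sentence _hdom hpre
  unfold Spec_create_ordered_list create_ordered_list create_ordered_list_alt
  dsimp only
  have hd : (PySem.List.enumerate (PySem.Str.split₀ sentence)).foldl
      (fun (word_roles : PySem.Dict (String × String) (List String)) iw =>
        word_roles.insert (iw.2, PySem.Int.toStr (iw.1 + 1))
          (pvRolesA data (iw.2, PySem.Int.toStr (iw.1 + 1)))) PySem.Dict.empty
      = PySem.Dict.ofList ((PySem.List.enumerate (PySem.Str.split₀ sentence)).map
          (fun iw => ((iw.2, PySem.Int.toStr (iw.1 + 1)),
                      (pvIndexB data).getD (iw.2, PySem.Int.toStr (iw.1 + 1)) []))) := by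
    show _ = ((PySem.List.enumerate (PySem.Str.split₀ sentence)).map
        (fun iw => ((iw.2, PySem.Int.toStr (iw.1 + 1)),
                    (pvIndexB data).getD (iw.2, PySem.Int.toStr (iw.1 + 1)) []))).foldl
        (fun (d : PySem.Dict (String × String) (List String))
             (q : (String × String) × List String) => d.insert q.1 q.2) PySem.Dict.empty
    rw [List.foldl_map]
    congr 1
    funext d iw
    rw [pv_roles_eq data _ hpre]
  rw [hd]
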